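-- pv_equiv track=rewrite | github.com/wrenchchatrepo/brain_imdone | process_urls.py | _review_github_files
-- ===== SOURCE A (Python) =====
-- from typing import List, Dict
--
-- def _review_github_files(files: List[str]) -> List[str]:
--     """Review GitHub files and filter out low-value files."""
--     valuable_files = []
--     skipped_files = []
--
--     for file in files:
--         # Skip binary files
--         if any(file.lower().endswith(ext) for ext in ['.jpg', '.jpeg', '.png', '.gif', '.ico', '.pdf', '.zip', '.tar', '.gz']):
--             skipped_files.append((file, 'binary_file'))
--             continue
--
--         # Skip generated files
--         if any(pattern in file.lower() for pattern in ['node_modules', 'dist', 'build', '.git', 'coverage', 'tmp']):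
--             skipped_files.append((file, 'generated_file'))
--             continue
--
--         # Skip test files unless they're documentation
--         if 'test' in file.lower() and not any(doc in file.lower() for doc in ['readme', 'docs', 'documentation']):
--             skipped_files.append((file, 'test_file'))
--             continue
--
--         # Skip configuration files unless they're documentation
--         if any(file.lower().endswith(ext) for ext in ['.json', '.yaml', '.yml', '.toml', '.ini', '.conf']) and not any(doc in file.lower() for doc in ['readme', 'docs', 'documentation']):
--             skipped_files.append((file, 'config_file'))
--             continue
--
--         valuable_files.append(file)
--
--     return valuable_files, skipped_files
-- ===== SOURCE B (Python) =====
-- def _review_github_files(files):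
--     """Review GitHub files and filter out low-value files (staged-sieve version)."""
--     def doc_free(low):
--         return not any(d in low for d in ('readme', 'docs', 'documentation'))
--
--     rules = [
--         ('binary_file', lambda low: low.endswith(('.jpg', '.jpeg', '.png', '.gif',
--                                                   '.ico', '.pdf', '.zip', '.tar', '.gz'))),
--         ('generated_file', lambda low: any(p in low for p in
--                                            ('node_modules', 'dist', 'build', '.git', 'coverage', 'tmp'))),
--         ('test_file', lambda low: 'test' in low and doc_free(low)),
--         ('config_file', lambda low: low.endswith(('.json', '.yaml', '.yml', '.toml', '.ini', '.conf'))
--                                     and doc_free(low)),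
--     ]
--
--     # Staged sieve: each rule, in priority order, removes its matches from the pool
--     # (so first-match-wins holds by construction); indices restore the original order.
--     remaining = list(enumerate(files))
--     skipped_tagged = []
--     for reason, pred in rules:
--         matched = [(i, f) for i, f in remaining if pred(f.lower())]
--         skipped_tagged += [(i, (f, reason)) for i, f in matched]
--         remaining = [(i, f) for i, f in remaining if not pred(f.lower())]
--
--     valuable_files = [f for i, f in remaining]
--     skipped_files = [p for i, p in sorted(skipped_tagged, key=lambda t: t[0])]
--     return valuable_files, skipped_files
-- ===== Notes on version B (the rewrite author's own statement) =====
-- stated objective: alternative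
-- what changed: Replaces A's per-file first-match if/continue cascade by a staged sieve: each rule in priority order filters its matches out of the remaining pool in a separate pass, skipped entries are tagged with their original enumerate index and reassembled into input order by sorting on that index; first-match-wins holds because a matched file is removed before later rules run.
import Mathlib
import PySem

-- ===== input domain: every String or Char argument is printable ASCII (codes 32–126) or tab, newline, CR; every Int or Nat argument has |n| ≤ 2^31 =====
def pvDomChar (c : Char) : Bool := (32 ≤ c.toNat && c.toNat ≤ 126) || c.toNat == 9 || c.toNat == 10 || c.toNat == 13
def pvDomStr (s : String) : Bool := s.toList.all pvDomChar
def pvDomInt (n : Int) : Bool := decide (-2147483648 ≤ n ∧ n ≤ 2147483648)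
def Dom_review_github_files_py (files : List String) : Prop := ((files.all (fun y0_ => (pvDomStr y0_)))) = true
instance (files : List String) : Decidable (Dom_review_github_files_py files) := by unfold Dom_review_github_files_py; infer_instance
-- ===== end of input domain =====

-- B replaces A's per-file first-match cascade by a staged sieve (one pass per rule over a
-- shrinking index-tagged pool, then a sort on the original index); objective: alternative.

-- ===== PORT A =====
-- one iteration of A's for-loop body (the four first-match-wins checks, in A's order)
def pvStepA (acc : List String × List (String × String)) (file : String) :
    List String × List (String × String) :=
  if ([".jpg", ".jpeg", ".png", ".gif", ".ico", ".pdf", ".zip", ".tar", ".gz"].any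
        (fun ext => PySem.Str.endswith (PySem.Str.lower file) ext)) then
    (acc.1, acc.2 ++ [(file, "binary_file")])
  else if (["node_modules", "dist", "build", ".git", "coverage", "tmp"].any
        (fun p => PySem.Str.isIn p (PySem.Str.lower file))) then
    (acc.1, acc.2 ++ [(file, "generated_file")])
  else if (PySem.Str.isIn "test" (PySem.Str.lower file) &&
        !(["readme", "docs", "documentation"].any
            (fun d => PySem.Str.isIn d (PySem.Str.lower file)))) then
    (acc.1, acc.2 ++ [(file, "test_file")])
  else if (([".json", ".yaml", ".yml", ".toml", ".ini", ".conf"].any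
        (fun ext => PySem.Str.endswith (PySem.Str.lower file) ext)) &&
        !(["readme", "docs", "documentation"].any
            (fun d => PySem.Str.isIn d (PySem.Str.lower file)))) then
    (acc.1, acc.2 ++ [(file, "config_file")])
  else
    (acc.1 ++ [file], acc.2)

def review_github_files_py (files : List String) : List String × (List (String × String)) :=
  files.foldl pvStepA ([], [])

-- ===== PORT B =====
def pvDocFree (low : String) : Bool :=
  !(["readme", "docs", "documentation"].any (fun d => PySem.Str.isIn d low))

-- B's ordered rule table: (reason, predicate on the lowercased path)
def pvRules : List (String × (String → Bool)) :=
  [("binary_file", fun low =>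
      [".jpg", ".jpeg", ".png", ".gif", ".ico", ".pdf", ".zip", ".tar", ".gz"].any
        (fun ext => PySem.Str.endswith low ext)),
   ("generated_file", fun low =>
      ["node_modules", "dist", "build", ".git", "coverage", "tmp"].any
        (fun p => PySem.Str.isIn p low)),
   ("test_file", fun low =>
      PySem.Str.isIn "test" low && pvDocFree low),
   ("config_file", fun low =>
      ([".json", ".yaml", ".yml", ".toml", ".ini", ".conf"].any
        (fun ext => PySem.Str.endswith low ext)) && pvDocFree low)]

-- one stage of B's sieve: the rule removes its matches from the remaining pool
-- and appends them, tagged with their original index, to skipped_tagged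
def pvSieveStep (st : List (Int × String) × List (Int × (String × String)))
    (rule : String × (String → Bool)) :
    List (Int × String) × List (Int × (String × String)) :=
  let matched := st.1.filter (fun p => rule.2 (PySem.Str.lower p.2))
  (st.1.filter (fun p => !rule.2 (PySem.Str.lower p.2)),
   st.2 ++ matched.map (fun p => (p.1, (p.2, rule.1))))

def review_github_files_py_alt (files : List String) : List String × (List (String × String)) :=
  let st := pvRules.foldl pvSieveStep (PySem.List.enumerate files, [])
  (st.1.map (·.2),
   (PySem.List.sorted st.2 (fun t => t.1) false).map (·.2))

-- ===== PRECONDITION & SPEC =====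
def Spec_review_github_files_py (files : List String) (out : List String × (List (String × String))) : Prop := out = review_github_files_py_alt files
instance (files : List String) (out : List String × (List (String × String))) : Decidable (Spec_review_github_files_py files out) := by unfold Spec_review_github_files_py; infer_instance

-- ===== CLAIM =====
def Claim_equal_review_github_files_py : Prop := ∀ (files : List String), Dom_review_github_files_py files → Spec_review_github_files_py files (review_github_files_py files)

-- ===== LEMMAS AND PROOFS =====

-- proof-only classifier: the reason of the first rule of rs matching the lowercased file
def pvClassifyR (rs : List (String × (String → Bool))) (file : String) : Option String :=
  (rs.find? (fun rp => rp.2 (PySem.Str.lower file))).map (·.1)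

-- A's loop body, characterised through the classifier over the full rule table
theorem pvStepA_classify (acc : List String × List (String × String)) (file : String) :
    pvStepA acc file =
      match pvClassifyR pvRules file with
      | none => (acc.1 ++ [file], acc.2)
      | some r => (acc.1, acc.2 ++ [(file, r)]) := by
  unfold pvStepA pvClassifyR pvRules pvDocFree
  cases h1 : ([".jpg", ".jpeg", ".png", ".gif", ".ico", ".pdf", ".zip", ".tar", ".gz"].any
        (fun ext => PySem.Str.endswith (PySem.Str.lower file) ext)) <;>
  cases h2 : (["node_modules", "dist", "build", ".git", "coverage", "tmp"].any
        (fun p => PySem.Str.isIn p (PySem.Str.lower file))) <;>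
  cases h3 : (PySem.Str.isIn "test" (PySem.Str.lower file) &&
        !(["readme", "docs", "documentation"].any
            (fun d => PySem.Str.isIn d (PySem.Str.lower file)))) <;>
  cases h4 : (([".json", ".yaml", ".yml", ".toml", ".ini", ".conf"].any
        (fun ext => PySem.Str.endswith (PySem.Str.lower file) ext)) &&
        !(["readme", "docs", "documentation"].any
            (fun d => PySem.Str.isIn d (PySem.Str.lower file)))) <;>
  (try simp only [List.find?_cons, List.find?_nil]) <;>
  rw [h1, h2, h3, h4] <;>
  simp

-- the tagging function B's target skipped list is built from
def pvTag (rs : List (String × (String → Bool))) (p : Int × String) :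
    Option (Int × (String × String)) :=
  (pvClassifyR rs p.2).map (fun c => (p.1, (p.2, c)))

-- the classifier steps through a rule
theorem pvClassifyR_cons (r : String × (String → Bool)) (rs : List (String × (String → Bool)))
    (f : String) :
    pvClassifyR (r :: rs) f =
      (if r.2 (PySem.Str.lower f) then some r.1 else pvClassifyR rs f) := by
  unfold pvClassifyR
  rw [List.find?_cons]
  split_ifs with h <;> simp [h]

-- loop invariant for B's sieve, remaining side
theorem pvSieve_fst (rs : List (String × (String → Bool)))
    (l : List (Int × String)) (s : List (Int × (String × String))) :
    (rs.foldl pvSieveStep (l, s)).1 = l.filter (fun p => (pvClassifyR rs p.2).isNone) := by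
  induction rs generalizing l s with
  | nil => simp [pvClassifyR]
  | cons r rest ih =>
    have hstep : pvSieveStep (l, s) r =
        (l.filter (fun p => !r.2 (PySem.Str.lower p.2)),
         s ++ (l.filter (fun p => r.2 (PySem.Str.lower p.2))).map
           (fun p => (p.1, (p.2, r.1)))) := rfl
    rw [List.foldl_cons, hstep, ih, List.filter_filter]
    apply List.filter_congr
    intro p _
    rw [pvClassifyR_cons]
    split_ifs with h <;> simp [h]

-- loop invariant for B's sieve, skipped side (up to permutation)
theorem pvSieve_snd_perm (rs : List (String × (String → Bool)))
    (l : List (Int × String)) (s : List (Int × (String × String))) :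
    ((rs.foldl pvSieveStep (l, s)).2).Perm (s ++ l.filterMap (pvTag rs)) := by
  induction rs generalizing l s with
  | nil => simp [pvTag, pvClassifyR]
  | cons r rest ih =>
    have hstep : pvSieveStep (l, s) r =
        (l.filter (fun p => !r.2 (PySem.Str.lower p.2)),
         s ++ (l.filter (fun p => r.2 (PySem.Str.lower p.2))).map
           (fun p => (p.1, (p.2, r.1)))) := rfl
    rw [List.foldl_cons, hstep]
    refine (ih _ _).trans ?_
    rw [List.append_assoc]
    apply List.Perm.append_left
    -- matched-tags ++ filterMap over the unmatched = filterMap over l, up to perm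
    have hsplit : ((l.filter (fun p => r.2 (PySem.Str.lower p.2))) ++
        (l.filter (fun p => !r.2 (PySem.Str.lower p.2)))).Perm l :=
      List.filter_append_perm _ l
    have := (hsplit.filterMap (pvTag (r :: rest))).symm
    refine List.Perm.trans ?_ this.symm
    rw [List.filterMap_append]
    apply List.Perm.append
    · -- on matched elements the tag is definite: filterMap = map
      have hm : ∀ p ∈ l.filter (fun p => r.2 (PySem.Str.lower p.2)),
          pvTag (r :: rest) p = some (p.1, (p.2, r.1)) := by
        intro p hp
        have := List.of_mem_filter hp
        unfold pvTag
        rw [pvClassifyR_cons]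
        simp [this]
      rw [List.filterMap_congr hm]
      simp
    · -- on unmatched elements the head rule is skipped
      have hu : ∀ p ∈ l.filter (fun p => !r.2 (PySem.Str.lower p.2)),
          pvTag (r :: rest) p = pvTag rest p := by
        intro p hp
        have := List.of_mem_filter hp
        unfold pvTag
        rw [pvClassifyR_cons]
        simp_all
      rw [List.filterMap_congr hu]

-- B's target skipped list over the enumerate has strictly increasing indices
theorem pvTarget_pairwise (files : List String) :
    ((PySem.List.enumerate files).filterMap (pvTag pvRules)).Pairwise
      (fun a b => a.1 < b.1) := by
  have h := PySem.List.pairwise_lt_enumerate (xs := files) (s := 0)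
  rw [List.pairwise_filterMap]
  refine h.imp_of_mem ?_
  intro a b _ _ hab x hx y hy
  unfold pvTag at hx hy
  cases ha : pvClassifyR pvRules a.2 <;> rw [ha] at hx <;> simp at hx
  cases hb : pvClassifyR pvRules b.2 <;> rw [hb] at hy <;> simp at hy
  subst hx; subst hy
  simpa using hab

-- hence the sort reassembles exactly the index-ordered target
theorem pvSorted_skipped (files : List String) :
    PySem.List.sorted ((pvRules.foldl pvSieveStep (PySem.List.enumerate files, [])).2)
        (fun t => t.1) false =
      (PySem.List.enumerate files).filterMap (pvTag pvRules) := by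
  apply PySem.List.sorted_eq_of_perm_of_pairwise_lt
  · exact ((pvSieve_snd_perm pvRules (PySem.List.enumerate files) []).trans (by simp)).symm
  · exact pvTarget_pairwise files

-- projecting the enumerate away: the filter side
theorem pvEnum_filter_map (files : List String) (s : Int) (q : String → Bool) :
    (((PySem.List.enumerate files s).filter (fun p => q p.2)).map (·.2)) =
      files.filter q := by
  induction files generalizing s with
  | nil => simp [PySem.List.enumerate_nil]
  | cons f rest ih =>
    rw [PySem.List.enumerate_cons, List.filter_cons]
    split_ifs with h <;> simp_all

-- projecting the enumerate away: the filterMap side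
theorem pvEnum_filterMap_map (files : List String) (s : Int) :
    (((PySem.List.enumerate files s).filterMap (pvTag pvRules)).map (·.2)) =
      files.filterMap (fun f => (pvClassifyR pvRules f).map (fun c => (f, c))) := by
  induction files generalizing s with
  | nil => simp [PySem.List.enumerate_nil]
  | cons f rest ih =>
    rw [PySem.List.enumerate_cons, List.filterMap_cons]
    cases h : pvTag pvRules (s, f) with
    | none =>
      unfold pvTag at h
      cases hc : pvClassifyR pvRules f <;> rw [hc] at h <;> simp at h
      simp [hc, ih]
    | some v =>
      unfold pvTag at h
      cases hc : pvClassifyR pvRules f <;> rw [hc] at h <;> simp at h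
      simp [hc, ih, ← h]

-- B computes the (filter, filterMap) canonical form
theorem pvAlt_canonical (files : List String) :
    review_github_files_py_alt files =
      (files.filter (fun f => (pvClassifyR pvRules f).isNone),
       files.filterMap (fun f => (pvClassifyR pvRules f).map (fun c => (f, c)))) := by
  simp only [review_github_files_py_alt]
  rw [pvSieve_fst, pvSorted_skipped,
      pvEnum_filter_map files 0 (fun f => (pvClassifyR pvRules f).isNone),
      pvEnum_filterMap_map files 0]

-- A's loop from any accumulator appends exactly the canonical two lists
theorem pvFoldA_eq (files : List String) (v : List String) (s : List (String × String)) :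
    files.foldl pvStepA (v, s) =
      (v ++ files.filter (fun f => (pvClassifyR pvRules f).isNone),
       s ++ files.filterMap (fun f => (pvClassifyR pvRules f).map (fun c => (f, c)))) := by
  induction files generalizing v s with
  | nil => simp
  | cons f rest ih =>
    rw [List.foldl_cons, pvStepA_classify (v, s) f]
    cases h : pvClassifyR pvRules f with
    | none =>
      simp only [List.filter_cons, List.filterMap_cons, h]
      simp [ih (v ++ [f]) s]
    | some r =>
      simp only [List.filter_cons, List.filterMap_cons, h]
      simp [ih v (s ++ [(f, r)])]

-- ===== VERDICT =====
theorem review_github_files_py_spec : Claim_equal_review_github_files_py := by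
  intro files _
  show review_github_files_py files = review_github_files_py_alt files
  rw [review_github_files_py, pvFoldA_eq files [] [], pvAlt_canonical]
  simp
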